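-- pv_equiv track=rewrite | github.com/BashithR/Traffic-Data-Processor-with-Tkintor | src/Task_A_B_C.py | average_bicycles_per_hour
-- ===== SOURCE A (Python) =====
-- def average_bicycles_per_hour(data):
--     """
--     Calculates the average number of bicycles per hour for the selected date.
--     Returns the average number of bicycles per hour, rounded to the nearest integer.
--     """
--     bicycles_per_hour = {}  # Dictionary to count bicycles per hour
--
--     # Loop through each row to filter bicycles and group by hour
--     for row in data:
--         if row['VehicleType'] == 'Bicycle':        # Filters rows where the VehicleType is 'Bicycle'
--             hour = row['timeOfDay'].split(':')[0]  # Extract the hour from 'timeOfDay'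
--
--             # Increment the count for this hour
--             if hour in bicycles_per_hour:
--                 """
--                 If the hour is already a key in the dictionary, increment its value by 1
--                 (a new bicycle is recorded for that hour).
--                 """
--                 bicycles_per_hour[hour] += 1
--             else:
--                 """
--                 If the hour is not already in the dictionary, add it as a key and set its value to 1
--                 (the first bicycle is recorded for that hour).
--                 """
--                 bicycles_per_hour[hour] = 1
--
--     # Calculate the total number of bicycles and the number of unique hours
--     """
--     Sums all the values in the dictionary (the counts of bicycles for each hour) to get the total number of bicycles.
--     """
--     total_bicycles = sum(bicycles_per_hour.values())
--     """
--     Counts the number of keys in the dictionary (the number of unique hours during which bicycles were recorded).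
--     """
--     total_hours = len(bicycles_per_hour)
--
--     if total_hours == 0: # Avoid division by zero and calculate the average
--         return 0
--     average = total_bicycles / total_hours # Calculates the average number of bicycles per hour.
--
--     return round(average) # Return the rounded average
-- ===== SOURCE B (Python) =====
-- def average_bicycles_per_hour(data):
--     """Average bicycles per recorded hour, rounded.
--     Sort-then-scan instead of hash counting: sort the bicycle rows' hour
--     strings, then count runs of equal adjacent hours to get the number of
--     distinct hours; total is just the length of the sorted list."""
--     hours = sorted(row['timeOfDay'].split(':')[0]
--                    for row in data if row['VehicleType'] == 'Bicycle')
--     distinct = 0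
--     prev = None
--     for h in hours:
--         if h != prev:
--             distinct += 1
--             prev = h
--     if distinct == 0:
--         return 0
--     return round(len(hours) / distinct)
-- ===== Notes on version B (the rewrite author's own statement) =====
-- stated objective: alternative
-- what changed: B replaces A's per-hour counting dict by sort-then-scan: it sorts the bicycle rows' hour strings and counts runs of equal adjacent hours to get the number of distinct hours, keeping only a scalar total (the list length) and never any per-hour counts.
import Mathlib
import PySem

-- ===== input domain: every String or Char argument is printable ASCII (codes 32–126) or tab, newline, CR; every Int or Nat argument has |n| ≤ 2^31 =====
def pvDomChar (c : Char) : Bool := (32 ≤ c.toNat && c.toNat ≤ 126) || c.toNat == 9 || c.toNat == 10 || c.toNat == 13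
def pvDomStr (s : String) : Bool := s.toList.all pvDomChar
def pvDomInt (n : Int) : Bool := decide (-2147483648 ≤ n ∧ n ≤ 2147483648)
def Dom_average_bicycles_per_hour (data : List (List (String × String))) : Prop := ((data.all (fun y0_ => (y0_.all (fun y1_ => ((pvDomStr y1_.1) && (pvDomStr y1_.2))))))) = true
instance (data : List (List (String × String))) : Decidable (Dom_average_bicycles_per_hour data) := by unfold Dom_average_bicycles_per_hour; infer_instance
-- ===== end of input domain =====

-- B replaces A's per-hour counting dict by sort-then-scan: sort the bicycle
-- rows' hour strings and count runs of equal adjacent hours; objective: alternative.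

-- ===== PORT A =====
-- round(t / h) for 0 ≤ t and 0 < h where the true quotient is far enough from a
-- half for the float division to be faithful (here t, h ≤ len(data)):
-- Python's round-half-to-even on the exact rational t/h.
def pyRoundDiv (t h : Int) : Int :=
  let q := PySem.Int.floordiv t h
  let r := PySem.Int.mod t h
  if 2 * r < h then q
  else if h < 2 * r then q + 1
  else if PySem.Int.mod q 2 = 0 then q else q + 1

-- row['timeOfDay'].split(':')[0]  (split with a nonempty sep is never empty, so [0] is the head)
def pvHour (s : String) : String :=
  (((PySem.Str.split? s ":").getD []).headD "")

def average_bicycles_per_hour (data : List (List (String × String))) : Int :=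
  let bph := data.foldl (fun (bph : PySem.Dict String Int) row =>
      if (PySem.Dict.mk row).getD "VehicleType" "" == "Bicycle" then
        let hour := pvHour ((PySem.Dict.mk row).getD "timeOfDay" "")
        if bph.contains hour then bph.insert hour (bph.getD hour 0 + 1)
        else bph.insert hour 1
      else bph) PySem.Dict.empty
  let total_bicycles := bph.values.sum
  let total_hours : Int := bph.size
  if total_hours = 0 then 0 else pyRoundDiv total_bicycles total_hours

-- ===== PORT B =====
def average_bicycles_per_hour_alt (data : List (List (String × String))) : Int :=
  let hours := PySem.List.sorted
      ((data.filter (fun row => (PySem.Dict.mk row).getD "VehicleType" "" == "Bicycle")).map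
        (fun row => pvHour ((PySem.Dict.mk row).getD "timeOfDay" "")))
      (fun x => x) false
  let st := hours.foldl
      (fun (st : Int × Option String) h => if some h ≠ st.2 then (st.1 + 1, some h) else st)
      ((0 : Int), (none : Option String))
  if st.1 = 0 then 0 else pyRoundDiv (hours.length : Int) st.1

-- ===== PRECONDITION & SPEC =====
-- Pre_ excludes exactly the inputs on which Python A raises KeyError: a row without
-- a 'VehicleType' key, or a Bicycle row without a 'timeOfDay' key.
def Pre_average_bicycles_per_hour (data : List (List (String × String))) : Prop :=
  ∀ row ∈ data, ((PySem.Dict.mk row).get? "VehicleType").isSome = true ∧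
    ((PySem.Dict.mk row).get? "VehicleType" = some "Bicycle" →
      ((PySem.Dict.mk row).get? "timeOfDay").isSome = true)
instance (data : List (List (String × String))) : Decidable (Pre_average_bicycles_per_hour data) := by
  unfold Pre_average_bicycles_per_hour; infer_instance

def pvWitness_average_bicycles_per_hour : (List (List (String × String))) :=
  [[("VehicleType", "Bicycle"), ("timeOfDay", "9:30")], [("VehicleType", "Car")]]

def Spec_average_bicycles_per_hour (data : List (List (String × String))) (out : Int) : Prop := out = average_bicycles_per_hour_alt data
instance (data : List (List (String × String))) (out : Int) : Decidable (Spec_average_bicycles_per_hour data out) := by unfold Spec_average_bicycles_per_hour; infer_instance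

-- ===== CLAIM (what is proved, stated in full; the proofs are below) =====
def Claim_equal_average_bicycles_per_hour : Prop := ∀ (data : List (List (String × String))), Dom_average_bicycles_per_hour data → Pre_average_bicycles_per_hour data → Spec_average_bicycles_per_hour data (average_bicycles_per_hour data)

-- ===== LEMMAS AND PROOFS =====

-- A's loop body for one bicycle row is the unconditional counting step.
theorem pvStep_eq (d : PySem.Dict String Int) (x : String) :
    (if d.contains x then d.insert x (d.getD x 0 + 1) else d.insert x 1)
      = d.insert x (d.getD x 0 + 1) := by
  by_cases h : d.contains x = true
  · simp [h]
  · simp only [Bool.not_eq_true] at h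
    simp [h, PySem.Dict.getD_of_not_contains d 0 h]

-- A's whole loop over data is the counting loop over the filtered list of hours.
theorem pvLoop_eq (data : List (List (String × String))) (d : PySem.Dict String Int) :
    data.foldl (fun (bph : PySem.Dict String Int) row =>
      if (PySem.Dict.mk row).getD "VehicleType" "" == "Bicycle" then
        let hour := pvHour ((PySem.Dict.mk row).getD "timeOfDay" "")
        if bph.contains hour then bph.insert hour (bph.getD hour 0 + 1)
        else bph.insert hour 1
      else bph) d
      = ((data.filter (fun row => (PySem.Dict.mk row).getD "VehicleType" "" == "Bicycle")).map
          (fun row => pvHour ((PySem.Dict.mk row).getD "timeOfDay" ""))).foldl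
          (fun d x => d.insert x (d.getD x 0 + 1)) d := by
  induction data generalizing d with
  | nil => rfl
  | cons row t ih =>
    simp only [List.foldl_cons, List.filter_cons]
    cases hc : ((PySem.Dict.mk row).getD "VehicleType" "" == "Bicycle") with
    | true =>
      simp only [if_pos, List.map_cons, List.foldl_cons]
      rw [pvStep_eq]
      exact ih _
    | false =>
      simp only [Bool.false_eq_true, if_false]
      exact ih d

-- sum of Counter(xs).values() = len(xs)
theorem pvCounter_values_sum (xs : List String) :
    (PySem.Dict.counter xs).values.sum = (xs.length : Int) := by
  have hperm : (PySem.Set.ofList xs).Perm xs.dedup :=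
    (List.perm_ext_iff_of_nodup (PySem.Set.nodup_ofList xs) xs.nodup_dedup).mpr
      (fun x => by rw [PySem.Set.mem_ofList, List.mem_dedup])
  have hv : (PySem.Dict.counter xs).values
      = (PySem.Set.ofList xs).map (fun k => (xs.count k : Int)) := by
    show (PySem.Dict.counter xs).items.map (·.2) = _
    rw [PySem.Dict.items_counter, List.map_map]; rfl
  rw [hv]
  calc ((PySem.Set.ofList xs).map (fun k => (xs.count k : Int))).sum
      = (xs.dedup.map (fun k => (xs.count k : Int))).sum := (hperm.map _).sum_eq
    _ = ((xs.dedup.map (fun k => xs.count k)).map (fun n : Nat => (n : Int))).sum := by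
          rw [List.map_map]; rfl
    _ = (((xs.dedup.map (fun k => xs.count k)).sum : Nat) : Int) := by
          rw [← Nat.cast_list_sum]
    _ = (xs.length : Int) := by rw [List.sum_map_count_dedup_eq_length]

-- len(Counter(xs)) = number of distinct elements of xs
theorem pvCounter_size (xs : List String) :
    (PySem.Dict.counter xs).size = (PySem.Set.ofList xs).length := by
  show (PySem.Dict.counter xs).items.length = _
  rw [PySem.Dict.items_counter, List.length_map]

-- |dedup (a::t)| = 1 + |elements of dedup t other than a|
theorem pvDedup_cons_len (a : String) (t : List String) :
    (List.dedup (a :: t)).length = 1 + ((t.dedup.filter (· ≠ a)).length : Int) := by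
  by_cases hm : a ∈ t
  · rw [List.dedup_cons_of_mem hm]
    have h2 := List.length_eq_length_filter_add (l := t.dedup) (· == a)
    have h1 : (t.dedup.filter (· == a)).length = 1 := by
      rw [← List.countP_eq_length_filter]
      have := List.count_dedup t a
      rw [if_pos hm] at this
      simpa [List.count] using this
    have h3 : (t.dedup.filter (fun x => !(x == a))).length = (t.dedup.filter (· ≠ a)).length := by
      congr 1
      apply List.filter_congr
      intro x _
      by_cases h : x = a <;> simp [h]
    omega
  · rw [List.dedup_cons_of_notMem hm]
    have hna : a ∉ t.dedup := fun h => hm (List.mem_dedup.mp h)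
    have hself : t.dedup.filter (· ≠ a) = t.dedup :=
      List.filter_eq_self.mpr (fun x hx => by
        simp only [ne_eq, decide_eq_true_eq]; exact fun he => hna (he ▸ hx))
    rw [hself, List.length_cons]
    omega

-- the run-counting fold on a sorted tail, with prev = some p and p ≤ everything
theorem pvRunAux (l : List String) (d : Int) (p : String)
    (hpw : l.Pairwise (· ≤ ·)) (hlb : ∀ b ∈ l, p ≤ b) :
    (l.foldl (fun (st : Int × Option String) h =>
        if some h ≠ st.2 then (st.1 + 1, some h) else st) (d, some p)).1
      = d + ((l.dedup.filter (· ≠ p)).length : Int) := by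
  induction l generalizing d p with
  | nil => simp
  | cons a t ih =>
    have hpw' := (List.pairwise_cons.mp hpw)
    by_cases hap : a = p
    · subst hap
      rw [List.foldl_cons, if_neg (by simp)]
      rw [ih d a hpw'.2 hpw'.1]
      congr 2
      by_cases hm : a ∈ t
      · rw [List.dedup_cons_of_mem hm]
      · rw [List.dedup_cons_of_notMem hm, List.filter_cons]
        simp
    · have hpa : p ≤ a := hlb a List.mem_cons_self
      have hpnt : p ∉ (a :: t) := by
        intro hmem
        rcases List.mem_cons.mp hmem with h | h
        · exact hap h.symm
        · exact hap (le_antisymm (hpw'.1 p h) hpa)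
      rw [List.foldl_cons, if_pos (by simp [hap])]
      rw [ih (d + 1) a hpw'.2 hpw'.1]
      have hfe : (a :: t).dedup.filter (· ≠ p) = (a :: t).dedup :=
        List.filter_eq_self.mpr (fun x hx => by
          simp only [ne_eq, decide_eq_true_eq]
          exact fun he => hpnt (he ▸ List.mem_dedup.mp hx))
      rw [hfe]
      have := pvDedup_cons_len a t
      omega

-- the whole B scan: run count of sorted(xs) = number of distinct elements of xs
theorem pvRunCount (xs : List String) :
    ((PySem.List.sorted xs (fun x => x) false).foldl (fun (st : Int × Option String) h =>
        if some h ≠ st.2 then (st.1 + 1, some h) else st) ((0 : Int), none)).1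
      = ((PySem.Set.ofList xs).length : Int) := by
  have hperm : (PySem.Set.ofList xs).Perm xs.dedup :=
    (List.perm_ext_iff_of_nodup (PySem.Set.nodup_ofList xs) xs.nodup_dedup).mpr
      (fun x => by rw [PySem.Set.mem_ofList, List.mem_dedup])
  have hsp : (PySem.List.sorted xs (fun x => x) false).Perm xs := PySem.List.sorted_perm xs _ _
  have hdl : (PySem.List.sorted xs (fun x => x) false).dedup.length = (PySem.Set.ofList xs).length := by
    rw [hsp.dedup.length_eq, ← hperm.length_eq]
  have hpw : (PySem.List.sorted xs (fun x => x) false).Pairwise (· ≤ ·) := by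
    simpa using PySem.List.sorted_pairwise xs (fun x => x)
  cases hs : PySem.List.sorted xs (fun x => x) false with
  | nil =>
    have : xs = [] := (PySem.List.sorted_eq_nil_iff xs (fun x => x) false).mp hs
    subst this; decide
  | cons a t =>
    rw [hs] at hpw hdl
    have hpw' := List.pairwise_cons.mp hpw
    simp only [List.foldl_cons]
    rw [if_pos (by simp)]
    rw [pvRunAux t (0 + 1) a hpw'.2 hpw'.1]
    have := pvDedup_cons_len a t
    omega

-- ===== VERDICT (by name: the statement is the Claim_ definition above) =====
theorem average_bicycles_per_hour_spec : Claim_equal_average_bicycles_per_hour := by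
  intro data _ _
  show average_bicycles_per_hour data = average_bicycles_per_hour_alt data
  unfold average_bicycles_per_hour average_bicycles_per_hour_alt
  rw [pvLoop_eq, PySem.Dict.foldl_insert_getD_add_one_eq_counter]
  set hrs := ((data.filter (fun row => (PySem.Dict.mk row).getD "VehicleType" "" == "Bicycle")).map
      (fun row => pvHour ((PySem.Dict.mk row).getD "timeOfDay" ""))) with hhrs
  simp only [pvCounter_values_sum, pvCounter_size, pvRunCount,
    (PySem.List.sorted_perm hrs (fun x => x) false).length_eq]
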